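-- pv_equiv track=rewrite | github.com/Toki-bio/LINE_walker-SINE_walker | sine_walker.py | auto_trim
-- ===== SOURCE A (Python) =====
-- def auto_trim(reconstruction_seq, coverage, min_cov=3):
--     """Trim reconstruction to the region supported by >= min_cov hits.
--
--     Scans inward from both ends until coverage meets the threshold.
--     Returns (trimmed_seq, trim_5p_bp, trim_3p_bp).
--     """
--     n = len(coverage)
--     if n == 0 or n != len(reconstruction_seq):
--         return reconstruction_seq, 0, 0
--
--     left = 0
--     while left < n and coverage[left] < min_cov:
--         left += 1
--
--     right = n - 1
--     while right >= 0 and coverage[right] < min_cov: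
--         right -= 1
--
--     if left > right:
--         return reconstruction_seq, 0, 0  # can't trim
--
--     return reconstruction_seq[left:right + 1], left, n - 1 - right
-- ===== SOURCE B (Python) =====
-- def auto_trim(reconstruction_seq, coverage, min_cov=3):
--     """Trim reconstruction to the region supported by >= min_cov hits.
--
--     One forward pass collects the indices meeting the threshold; the
--     trimmed region is spanned by the first and last such index.
--     Returns (trimmed_seq, trim_5p_bp, trim_3p_bp).
--     """
--     n = len(coverage)
--     if n == 0 or n != len(reconstruction_seq):
--         return reconstruction_seq, 0, 0
--
--     good = [i for i, c in enumerate(coverage) if c >= min_cov]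
--     if not good:
--         return reconstruction_seq, 0, 0  # can't trim
--
--     left, right = good[0], good[-1]
--     return reconstruction_seq[left:right + 1], left, n - 1 - right
-- ===== Notes on version B (the rewrite author's own statement) =====
-- stated objective: simpler
-- what changed: Replaced the two bidirectional early-terminating while scans with one forward pass collecting all qualifying indices; the trim bounds are the first and last element of that list.
import Mathlib
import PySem

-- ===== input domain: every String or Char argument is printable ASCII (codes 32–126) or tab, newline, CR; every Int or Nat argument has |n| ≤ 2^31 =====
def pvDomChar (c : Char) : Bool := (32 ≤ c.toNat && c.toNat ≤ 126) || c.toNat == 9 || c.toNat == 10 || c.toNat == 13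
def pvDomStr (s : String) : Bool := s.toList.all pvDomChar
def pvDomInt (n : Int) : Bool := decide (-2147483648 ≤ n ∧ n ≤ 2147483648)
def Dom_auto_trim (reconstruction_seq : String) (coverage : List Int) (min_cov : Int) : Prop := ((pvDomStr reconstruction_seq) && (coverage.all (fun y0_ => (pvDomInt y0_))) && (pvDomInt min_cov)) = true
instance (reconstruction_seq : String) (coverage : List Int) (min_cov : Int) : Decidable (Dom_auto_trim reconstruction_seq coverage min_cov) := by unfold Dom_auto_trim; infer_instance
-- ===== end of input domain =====

-- B replaces A's two bidirectional early-terminating scans with one forward pass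
-- collecting the qualifying indices and reading its endpoints (objective: simpler).

-- ===== PORT A =====
-- while left < n and coverage[left] < min_cov: left += 1   (forward scan as structural recursion)
def pvLeftScan (min_cov : Int) : List Int → Nat
  | [] => 0
  | c :: rest => if c < min_cov then pvLeftScan min_cov rest + 1 else 0

-- while right >= 0 and coverage[right] < min_cov: right -= 1
def pvRightScan (coverage : List Int) (min_cov : Int) (right : Int) : Int :=
  if 0 ≤ right ∧ (PySem.List.pyGet? coverage right).getD 0 < min_cov then
    pvRightScan coverage min_cov (right - 1)
  else right
termination_by (right + 1).toNat
decreasing_by rename_i h; omega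

def auto_trim (reconstruction_seq : String) (coverage : List Int) (min_cov : Int) : String × Int × Int :=
  let n := coverage.length
  if n = 0 ∨ (n : Int) ≠ PySem.Str.len reconstruction_seq then (reconstruction_seq, 0, 0)
  else
    let left : Nat := pvLeftScan min_cov coverage
    let right : Int := pvRightScan coverage min_cov ((n : Int) - 1)
    if (left : Int) > right then (reconstruction_seq, 0, 0)
    else (PySem.Str.slice reconstruction_seq (some (left : Int)) (some (right + 1)),
          (left : Int), (n : Int) - 1 - right)

-- ===== PORT B =====
def auto_trim_alt (reconstruction_seq : String) (coverage : List Int) (min_cov : Int) : String × Int × Int :=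
  let n := coverage.length
  if n = 0 ∨ (n : Int) ≠ PySem.Str.len reconstruction_seq then (reconstruction_seq, 0, 0)
  else
    -- good = [i for i, c in enumerate(coverage) if c >= min_cov]
    let good : List Int :=
      ((PySem.List.enumerate coverage 0).filter (fun p => decide (min_cov ≤ p.2))).map Prod.fst
    match good with
    | [] => (reconstruction_seq, 0, 0)
    | left :: rest =>
      let right : Int := (left :: rest).getLast (by simp)
      (PySem.Str.slice reconstruction_seq (some left) (some (right + 1)),
       left, (n : Int) - 1 - right)

-- ===== PRECONDITION & SPEC =====
def Spec_auto_trim (reconstruction_seq : String) (coverage : List Int) (min_cov : Int) (out : String × Int × Int) : Prop := out = auto_trim_alt reconstruction_seq coverage min_cov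
instance (reconstruction_seq : String) (coverage : List Int) (min_cov : Int) (out : String × Int × Int) : Decidable (Spec_auto_trim reconstruction_seq coverage min_cov out) := by unfold Spec_auto_trim; infer_instance

-- ===== CLAIM (what is proved, stated in full; the proofs are below) =====
def Claim_equal_auto_trim : Prop := ∀ (reconstruction_seq : String) (coverage : List Int) (min_cov : Int), Dom_auto_trim reconstruction_seq coverage min_cov → Spec_auto_trim reconstruction_seq coverage min_cov (auto_trim reconstruction_seq coverage min_cov)

-- ===== LEMMAS AND PROOFS =====

-- the index list B builds, with a general start offset
def pvGood (min_cov : Int) (s : Int) (cov : List Int) : List Int :=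
  ((PySem.List.enumerate cov s).filter (fun p => decide (min_cov ≤ p.2))).map Prod.fst

theorem pvGood_nil (m s : Int) : pvGood m s [] = [] := by
  simp [pvGood, PySem.List.enumerate_nil]

theorem pvGood_cons (m s c : Int) (rest : List Int) :
    pvGood m s (c :: rest) =
      if m ≤ c then s :: pvGood m (s + 1) rest else pvGood m (s + 1) rest := by
  simp [pvGood, PySem.List.enumerate_cons]
  split_ifs with h <;> simp [h]

theorem pvGood_append (m s : Int) (xs : List Int) (x : Int) :
    pvGood m s (xs ++ [x]) =
      pvGood m s xs ++ (if m ≤ x then [s + xs.length] else []) := by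
  simp [pvGood, PySem.List.enumerate_append, PySem.List.enumerate_cons, PySem.List.enumerate_nil]
  split_ifs with h <;> simp [h]

theorem pvGood_empty_iff (m s : Int) (cov : List Int) :
    pvGood m s cov = [] ↔ ∀ c ∈ cov, c < m := by
  induction cov generalizing s with
  | nil => simp [pvGood_nil]
  | cons c rest ih =>
    rw [pvGood_cons]
    split_ifs with h
    · simp; intro hlt; omega
    · simp [ih]; intro _; omega

theorem pvGood_head? (m s : Int) (cov : List Int) (hne : pvGood m s cov ≠ []) :
    (pvGood m s cov).head? = some (s + (pvLeftScan m cov : Int)) := by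
  induction cov generalizing s with
  | nil => simp [pvGood_nil] at hne
  | cons c rest ih =>
    rw [pvGood_cons] at hne ⊢
    split_ifs with h
    · simp [pvLeftScan, show ¬ c < m by omega]
    · have := ih (s + 1) (by simpa [h] using hne)
      rw [this]
      simp [pvLeftScan, show c < m by omega]
      ring

theorem pvGood_pairwise (m s : Int) (cov : List Int) :
    (pvGood m s cov).Pairwise (· < ·) := by
  have h1 := PySem.List.pairwise_lt_enumerate (xs := cov) (s := s)
  exact (List.Pairwise.filter _ h1).map _ (fun a b hab => hab)

-- left scan when nothing qualifies
theorem pvLeftScan_all (m : Int) (cov : List Int) (h : ∀ c ∈ cov, c < m) :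
    pvLeftScan m cov = cov.length := by
  induction cov with
  | nil => simp [pvLeftScan]
  | cons c rest ih =>
    simp [pvLeftScan, h c (by simp)]
    exact ih (fun x hx => h x (by simp [hx]))

-- right scan when nothing qualifies: runs down to -1
theorem pvRightScan_all (m : Int) (cov : List Int) (h : ∀ c ∈ cov, c < m) :
    ∀ r : Int, -1 ≤ r → r < cov.length → pvRightScan cov m r = -1 := by
  intro r
  induction hk : (r + 1).toNat generalizing r with
  | zero =>
    intro h1 _; rw [pvRightScan]
    have : r = -1 := by omega
    simp [this]
  | succ k ih =>
    intro h1 h2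
    rw [pvRightScan]
    have hr0 : 0 ≤ r := by omega
    have hget : (PySem.List.pyGet? cov r).getD 0 < m := by
      have heq : PySem.List.pyGet? cov r = cov[r.toNat]? := by
        have := PySem.List.pyGet?_natCast (xs := cov) (n := r.toNat)
        rwa [Int.toNat_of_nonneg hr0] at this
      rw [heq]
      have hlt : r.toNat < cov.length := by omega
      simp [List.getElem?_eq_getElem hlt]
      exact h _ (List.getElem_mem hlt)
    rw [if_pos ⟨hr0, hget⟩]
    exact ih (r - 1) (by omega) (by omega) (by omega)

theorem pvRightScan_append_lt (cov : List Int) (x m : Int) :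
    ∀ r : Int, r < cov.length → pvRightScan (cov ++ [x]) m r = pvRightScan cov m r := by
  intro r
  induction hk : (r + 1).toNat generalizing r with
  | zero =>
    intro _
    conv_lhs => rw [pvRightScan]
    conv_rhs => rw [pvRightScan]
    rw [if_neg (fun hc => by omega), if_neg (fun hc => by omega)]
  | succ k ih =>
    intro h2
    by_cases hr0 : 0 ≤ r
    · have hlt : r.toNat < cov.length := by omega
      have hsame : PySem.List.pyGet? (cov ++ [x]) r = PySem.List.pyGet? cov r := by
        have h1 := PySem.List.pyGet?_natCast (xs := cov ++ [x]) (n := r.toNat)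
        have h2' := PySem.List.pyGet?_natCast (xs := cov) (n := r.toNat)
        rw [Int.toNat_of_nonneg hr0] at h1 h2'
        rw [h1, h2', List.getElem?_append_left hlt]
      by_cases hc : (PySem.List.pyGet? cov r).getD 0 < m
      · conv_lhs => rw [pvRightScan]
        conv_rhs => rw [pvRightScan]
        rw [if_pos ⟨hr0, by rw [hsame]; exact hc⟩, if_pos ⟨hr0, hc⟩]
        exact ih (r - 1) (by omega) (by omega)
      · conv_lhs => rw [pvRightScan]
        conv_rhs => rw [pvRightScan]
        rw [if_neg (fun h => hc (by rw [← hsame]; exact h.2)), if_neg (fun h => hc h.2)]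
    · conv_lhs => rw [pvRightScan]
      conv_rhs => rw [pvRightScan]
      rw [if_neg (fun hc => hr0 hc.1), if_neg (fun hc => hr0 hc.1)]

theorem pvGood_getLast? (m : Int) (cov : List Int) (hne : pvGood m 0 cov ≠ []) :
    (pvGood m 0 cov).getLast? = some (pvRightScan cov m ((cov.length : Int) - 1)) := by
  induction cov using List.reverseRecOn with
  | nil => simp [pvGood_nil] at hne
  | append_singleton xs x ih =>
    have hgapp := pvGood_append m 0 xs x
    have hget : PySem.List.pyGet? (xs ++ [x]) (((xs ++ [x]).length : Int) - 1) = some x := by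
      have hcast : ((xs ++ [x]).length : Int) - 1 = ((xs.length : Nat) : Int) := by simp
      rw [hcast, PySem.List.pyGet?_natCast]
      simp
    by_cases h : m ≤ x
    · conv_rhs => rw [pvRightScan]
      rw [hget]
      rw [if_neg (fun hc => by have := hc.2; simp at this; omega)]
      rw [hgapp, if_pos h, List.getLast?_concat]
      simp
    · have hg : pvGood m 0 (xs ++ [x]) = pvGood m 0 xs := by rw [hgapp]; simp [h]
      have hne' : pvGood m 0 xs ≠ [] := by rw [hg] at hne; exact hne
      conv_rhs => rw [pvRightScan]
      rw [hget]
      rw [if_pos ⟨by simp, by simp; omega⟩]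
      have hlen : ((xs ++ [x]).length : Int) - 1 - 1 = (xs.length : Int) - 1 := by simp
      rw [hlen, pvRightScan_append_lt xs x m _ (by omega), hg]
      exact ih hne'

theorem pvPairwise_head_le (a b : Int) (t : List Int)
    (hp : (a :: t).Pairwise (fun x y : Int => x < y))
    (hb : (a :: t).getLast? = some b) : a ≤ b := by
  have hmem : b ∈ a :: t := List.mem_of_getLast? hb
  rcases List.mem_cons.mp hmem with h | h
  · omega
  · have := (List.pairwise_cons.mp hp).1 b h
    omega

-- ===== VERDICT (by name: the statement is the Claim_ definition above) =====
theorem auto_trim_spec : Claim_equal_auto_trim := by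
  intro s cov m _
  unfold Spec_auto_trim auto_trim auto_trim_alt
  by_cases hg : cov.length = 0 ∨ (cov.length : Int) ≠ PySem.Str.len s
  · simp only [if_pos hg]
  · simp only [if_neg hg]
    rw [not_or] at hg
    have hn : 0 < cov.length := Nat.pos_of_ne_zero hg.1
    by_cases hne : pvGood m 0 cov = []
    · have hall : ∀ c ∈ cov, c < m := (pvGood_empty_iff m 0 cov).mp hne
      have hl : pvLeftScan m cov = cov.length := pvLeftScan_all m cov hall
      have hr : pvRightScan cov m ((cov.length : Int) - 1) = -1 :=
        pvRightScan_all m cov hall _ (by omega) (by omega)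
      simp only [hl, hr]
      rw [if_pos (by omega)]
      have hmatch : (((PySem.List.enumerate cov 0).filter (fun p => decide (m ≤ p.2))).map Prod.fst) = [] := hne
      simp only [hmatch]
    · obtain ⟨a, t, hat⟩ := List.exists_cons_of_ne_nil hne
      have hmatch : (((PySem.List.enumerate cov 0).filter (fun p => decide (m ≤ p.2))).map Prod.fst) = a :: t := hat
      have hhead : a = (pvLeftScan m cov : Int) := by
        have h1 := pvGood_head? m 0 cov hne
        rw [hat] at h1
        simp at h1
        omega
      have h1 := pvGood_getLast? m cov hne
      rw [hat] at h1
      have hgl : (a :: t).getLast (by simp) = pvRightScan cov m ((cov.length : Int) - 1) := by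
        rw [List.getLast?_eq_some_getLast (show (a :: t) ≠ [] by simp)] at h1
        exact Option.some.inj h1
      have hle : a ≤ (a :: t).getLast (by simp) := by
        apply pvPairwise_head_le a _ t _ (by rw [hgl, ← h1]  )
        rw [← hat]
        exact pvGood_pairwise m 0 cov
      simp only [hmatch]
      rw [if_neg (by rw [← hgl, ← hhead]; omega)]
      rw [← hgl, ← hhead]
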